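-- pv_equiv track=rewrite | github.com/Cooper-Thomas1/Python-Projects | Train Route Testing Project.py | trains_planes
-- ===== SOURCE A (Python) =====
-- class Union_Find:
--     def __init__(self):
--         self.parent = {}
--         self.rank = {}
--
--     def find(self, x):
--         if self.parent.get(x, x) != x:
--             self.parent[x] = self.find(self.parent[x])
--         return self.parent.get(x, x)
--
--     def union(self, x, y):
--         root_x = self.find(x)
--         root_y = self.find(y)
--         if root_x != root_y:
--             if self.rank.get(root_x, 0) > self.rank.get(root_y, 0):
--                 self.parent[root_y] = root_x
--             elif self.rank.get(root_x, 0) < self.rank.get(root_y, 0):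
--                 self.parent[root_x] = root_y
--             else:
--                 self.parent[root_y] = root_x
--                 self.rank[root_x] = self.rank.get(root_x, 0) + 1
--
-- def trains_planes(trains, planes):
--     """Find what flights can be replaced with a rail journey.
--
--     Initially, there are no rail connections between cities. As rail connections
--     become available, we are interested in knowing what flights can be replaced
--     by a rail journey, no matter how indirect the route. All rail connections
--     are bidirectional.
--
--     Target Complexity: O(N lg N) in the size of the input (trains + planes).
--
--     Args:
--         trains: A list of `(date, lcity, rcity)` tuples specifying that a rail
--             connection between `lcity` and `rcity` became available on `date`.
--         planes: A list of `(code, date, depart, arrive)` tuples specifying that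
--             there is a flight scheduled from `depart` to `arrive` on `date` with
--             flight number `code`.
--
--     Returns:
--         A list of flights that could be replaced by a train journey.
--     """
--     trains.sort(key=lambda x: x[0])
--     planes.sort(key=lambda x: x[1])
--
--     union_find = Union_Find()
--     replaceable_flights = []
--
--     train_index = 0
--     number_of_trains = len(trains)
--
--     for code, date, depart, arrive in planes:
--         while train_index < number_of_trains and trains[train_index][0] <= date:
--             _, lcity, rcity = trains[train_index]
--             union_find.union(lcity, rcity)
--             train_index += 1
--
--         if union_find.find(depart) == union_find.find(arrive):
--             replaceable_flights.append((code, date, depart, arrive))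
--
--     return replaceable_flights
-- ===== SOURCE B (Python) =====
-- def trains_planes(trains, planes):
--     """Find what flights can be replaced with a rail journey.
--
--     Same date-ordered sweep as the spec asks, but connectivity is kept as a
--     flat label dict (city -> class label) that is rewritten wholesale on each
--     merge, instead of a union-find forest.
--     """
--     trains.sort(key=lambda x: x[0])
--     planes.sort(key=lambda x: x[1])
--
--     comp = {}
--     replaceable_flights = []
--     ti = 0
--     n = len(trains)
--
--     for code, date, depart, arrive in planes:
--         while ti < n and trains[ti][0] <= date:
--             _, lcity, rcity = trains[ti]
--             a = comp.setdefault(lcity, lcity)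
--             b = comp.setdefault(rcity, rcity)
--             if a != b:
--                 comp = {k: (a if v == b else v) for k, v in comp.items()}
--             ti += 1
--
--         if comp.get(depart, depart) == comp.get(arrive, arrive):
--             replaceable_flights.append((code, date, depart, arrive))
--
--     return replaceable_flights
-- ===== Notes on version B (the rewrite author's own statement) =====
-- stated objective: alternative
-- what changed: Keeps the same date-sorted sweep but replaces the rank/path-compression union-find forest with a flat city->label dict that is rewritten wholesale on each merge; flights are kept when depart and arrive carry the same label.
import Mathlib
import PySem

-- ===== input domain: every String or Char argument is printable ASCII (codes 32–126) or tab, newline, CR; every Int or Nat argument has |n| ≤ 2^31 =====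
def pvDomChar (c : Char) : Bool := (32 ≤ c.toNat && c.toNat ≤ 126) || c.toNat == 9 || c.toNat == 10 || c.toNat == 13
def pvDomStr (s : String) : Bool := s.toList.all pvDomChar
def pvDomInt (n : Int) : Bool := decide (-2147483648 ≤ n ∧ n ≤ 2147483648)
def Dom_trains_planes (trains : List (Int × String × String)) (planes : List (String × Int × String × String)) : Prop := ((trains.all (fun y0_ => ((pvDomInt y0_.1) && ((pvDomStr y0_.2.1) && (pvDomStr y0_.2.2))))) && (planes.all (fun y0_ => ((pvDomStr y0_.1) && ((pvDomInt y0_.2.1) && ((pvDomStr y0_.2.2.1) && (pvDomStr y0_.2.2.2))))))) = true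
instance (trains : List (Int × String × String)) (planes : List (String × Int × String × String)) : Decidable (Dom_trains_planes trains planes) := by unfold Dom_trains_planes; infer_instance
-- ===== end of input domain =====

-- B replaces A's rank/path-compression union-find by a flat city->label dict rewritten on each merge
-- (same sorted sweep, same output order); both, like the Pythons, conceptually sort their list arguments
-- (the Pythons sort in place; the equivalence proved here is about the return value).


-- ===== PORT A =====
structure UF where
  parent : PySem.Dict String String
  rank : PySem.Dict String Int
deriving Repr, DecidableEq

-- Union_Find.find; the fuel only totalises the recursion (the parent forest is acyclic, so a chain
-- never revisits a key and `parent.size + 1` fuel — supplied at every call site — is always enough).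
def ufFind (fuel : Nat) (uf : UF) (x : String) : UF × String :=
  match fuel with
  | 0 => (uf, x)
  | Nat.succ f =>
    if uf.parent.getD x x ≠ x then
      let s := ufFind f uf (uf.parent.getD x x)
      let uf2 : UF := ⟨s.1.parent.insert x s.2, s.1.rank⟩
      (uf2, uf2.parent.getD x x)
    else (uf, x)

def ufFindP (uf : UF) (x : String) : UF × String := ufFind (uf.parent.size + 1) uf x

-- Union_Find.union
def ufUnion (uf : UF) (x y : String) : UF :=
  let s1 := ufFindP uf x
  let s2 := ufFindP s1.1 y
  let uf2 := s2.1
  if s1.2 ≠ s2.2 then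
    if uf2.rank.getD s1.2 0 > uf2.rank.getD s2.2 0 then ⟨uf2.parent.insert s2.2 s1.2, uf2.rank⟩
    else if uf2.rank.getD s1.2 0 < uf2.rank.getD s2.2 0 then ⟨uf2.parent.insert s1.2 s2.2, uf2.rank⟩
    else ⟨uf2.parent.insert s2.2 s1.2, uf2.rank.insert s1.2 (uf2.rank.getD s1.2 0 + 1)⟩
  else uf2

-- the inner `while train_index < n and trains[train_index][0] <= date` sweep (index sweep as the remaining suffix)
def aSweep (uf : UF) (rem : List (Int × String × String)) (date : Int) : UF × List (Int × String × String) :=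
  match rem with
  | [] => (uf, [])
  | (d, l, r) :: t => if d ≤ date then aSweep (ufUnion uf l r) t date else (uf, (d, l, r) :: t)

def aLoop (uf : UF) (rem : List (Int × String × String)) (planes : List (String × Int × String × String)) : List (String × Int × String × String) :=
  match planes with
  | [] => []
  | (code, date, dep, arr) :: ps =>
    let sw := aSweep uf rem date
    let f1 := ufFindP sw.1 dep
    let f2 := ufFindP f1.1 arr
    if f1.2 = f2.2 then (code, date, dep, arr) :: aLoop f2.1 sw.2 ps
    else aLoop f2.1 sw.2 ps

def trains_planes (trains : List (Int × String × String)) (planes : List (String × Int × String × String)) : List (String × Int × String × String) :=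
  aLoop ⟨PySem.Dict.empty, PySem.Dict.empty⟩
    (PySem.List.sorted trains (fun x => x.1))
    (PySem.List.sorted planes (fun x => x.2.1))

-- ===== PORT B =====
-- one train edge: setdefault both endpoints, then relabel b's whole class to a
def bStep (c : PySem.Dict String String) (l r : String) : PySem.Dict String String :=
  let c1 := c.setdefault l l
  let a := c1.getD l l
  let c2 := c1.setdefault r r
  let b := c2.getD r r
  if a ≠ b then PySem.Dict.mk (c2.items.map (fun kv => (kv.1, if kv.2 = b then a else kv.2)))
  else c2

def bSweep (c : PySem.Dict String String) (rem : List (Int × String × String)) (date : Int) : PySem.Dict String String × List (Int × String × String) :=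
  match rem with
  | [] => (c, [])
  | (d, l, r) :: t => if d ≤ date then bSweep (bStep c l r) t date else (c, (d, l, r) :: t)

def bLoop (c : PySem.Dict String String) (rem : List (Int × String × String)) (planes : List (String × Int × String × String)) : List (String × Int × String × String) :=
  match planes with
  | [] => []
  | (code, date, dep, arr) :: ps =>
    let sw := bSweep c rem date
    if sw.1.getD dep dep = sw.1.getD arr arr then (code, date, dep, arr) :: bLoop sw.1 sw.2 ps
    else bLoop sw.1 sw.2 ps

def trains_planes_alt (trains : List (Int × String × String)) (planes : List (String × Int × String × String)) : List (String × Int × String × String) :=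
  bLoop PySem.Dict.empty
    (PySem.List.sorted trains (fun x => x.1))
    (PySem.List.sorted planes (fun x => x.2.1))

-- ===== PRECONDITION & SPEC =====
def Spec_trains_planes (trains : List (Int × String × String)) (planes : List (String × Int × String × String)) (out : List (String × Int × String × String)) : Prop := out = trains_planes_alt trains planes
instance (trains : List (Int × String × String)) (planes : List (String × Int × String × String)) (out : List (String × Int × String × String)) : Decidable (Spec_trains_planes trains planes out) := by unfold Spec_trains_planes; infer_instance

-- ===== CLAIM (what is proved, stated in full; the proofs are below) =====
def Claim_equal_trains_planes : Prop := ∀ (trains : List (Int × String × String)) (planes : List (String × Int × String × String)), Dom_trains_planes trains planes → Spec_trains_planes trains planes (trains_planes trains planes)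

-- ===== LEMMAS AND PROOFS =====

-- the label B associates with a city (its own name while unseen)
def labD (c : PySem.Dict String String) (x : String) : String := c.getD x x

-- The coupling invariant between A's union-find state and B's label dict, for a ranking rk that
-- decreases along parent links: (E1) each parent link goes strictly down in rk and stays in the same
-- label class; (E2) distinct roots carry distinct labels; (E3) every value stored in c is one of c's
-- keys; (E4) parent's keys are distinct.
def InvP (uf : UF) (c : PySem.Dict String String) (rk : String → Nat) : Prop :=
  (∀ x p, uf.parent.get? x = some p → rk p < rk x ∧ labD c p = labD c x) ∧
  (∀ z w, uf.parent.get? z = none → uf.parent.get? w = none → labD c z = labD c w → z = w) ∧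
  (∀ k v, c.get? k = some v → c.contains v = true) ∧
  uf.parent.keys.Nodup

def UCInv (uf : UF) (c : PySem.Dict String String) : Prop := ∃ rk, InvP uf c rk

theorem ufFind_spec (c : PySem.Dict String String) (rk : String → Nat) :
    ∀ (fuel : Nat) (uf : UF) (x : String), InvP uf c rk →
    (uf.parent.keys.filter (fun k => rk k ≤ rk x)).length < fuel →
    InvP (ufFind fuel uf x).1 c rk ∧
    (ufFind fuel uf x).1.parent.keys = uf.parent.keys ∧
    labD c (ufFind fuel uf x).2 = labD c x ∧
    (ufFind fuel uf x).1.parent.get? (ufFind fuel uf x).2 = none ∧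
    rk (ufFind fuel uf x).2 ≤ rk x := by
  intro fuel
  induction fuel with
  | zero => intro uf x _ hlt; exact absurd hlt (by omega)
  | succ f ih =>
    intro uf x hInv hlt
    obtain ⟨hE1, hE2, hE3, hND⟩ := hInv
    by_cases hx : uf.parent.getD x x = x
    · have hroot : uf.parent.get? x = none := by
        cases hg : uf.parent.get? x with
        | none => rfl
        | some p =>
          have hpd : uf.parent.getD x x = p := PySem.Dict.getD_of_get?_eq_some _ _ hg
          have : rk p < rk x := (hE1 x p hg).1
          rw [hpd] at hx
          subst hx
          omega
      simp only [ufFind, if_neg (not_not_intro hx)]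
      exact ⟨⟨hE1, hE2, hE3, hND⟩, trivial, trivial, hroot, le_refl _⟩
    · have hg : uf.parent.get? x = some (uf.parent.getD x x) := by
        cases hgg : uf.parent.get? x with
        | none => exact absurd (PySem.Dict.getD_of_get?_eq_none _ _ hgg) hx
        | some q => rw [PySem.Dict.getD_of_get?_eq_some _ _ hgg]
      have hE1x := hE1 x _ hg
      have hxmem : x ∈ uf.parent.keys := by
        by_contra hmem
        rw [← PySem.Dict.get?_eq_none_iff_not_mem_keys] at hmem
        simp [hmem] at hg
      have hrec : (uf.parent.keys.filter (fun k => rk k ≤ rk (uf.parent.getD x x))).length < f := by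
        have hsub : (uf.parent.keys.filter (fun k => rk k ≤ rk (uf.parent.getD x x))).Sublist
            ((uf.parent.keys.filter (fun k => rk k ≤ rk x)).filter (fun k => ¬ (k = x))) := by
          rw [List.filter_filter]
          apply List.monotone_filter_right
          intro a ha
          simp only [decide_eq_true_eq] at ha
          have h1 : rk a < rk x := lt_of_le_of_lt ha hE1x.1
          have h2 : a ≠ x := by intro he; rw [he] at h1; omega
          simp [h1.le, h2]
        have hlt2 : ((uf.parent.keys.filter (fun k => rk k ≤ rk x)).filter (fun k => ¬ (k = x))).length <
            (uf.parent.keys.filter (fun k => rk k ≤ rk x)).length := by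
          rw [List.length_filter_lt_length_iff_exists]
          exact ⟨x, by simp [List.mem_filter, hxmem], by simp⟩
        have h3 := hsub.length_le
        omega
      obtain ⟨ihInv, ihkeys, ihlab, ihroot, ihrk⟩ := ih uf (uf.parent.getD x x) ⟨hE1, hE2, hE3, hND⟩ hrec
      have hxmem1 : x ∈ (ufFind f uf (uf.parent.getD x x)).1.parent.keys := ihkeys ▸ hxmem
      have hcont1 : (ufFind f uf (uf.parent.getD x x)).1.parent.contains x = true :=
        (PySem.Dict.contains_iff_mem_keys _ x).mpr hxmem1
      have hkeys2 : ((ufFind f uf (uf.parent.getD x x)).1.parent.insert x (ufFind f uf (uf.parent.getD x x)).2).keys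
          = (ufFind f uf (uf.parent.getD x x)).1.parent.keys :=
        PySem.Dict.keys_insert_of_contains _ _ hcont1
      have hgx1 : (ufFind f uf (uf.parent.getD x x)).1.parent.get? x ≠ none := by
        simp only [ne_eq, PySem.Dict.get?_eq_none_iff_not_mem_keys]
        exact fun h => h hxmem1
      have hrx : (ufFind f uf (uf.parent.getD x x)).2 ≠ x := by
        intro he
        rw [he] at ihroot
        exact hgx1 ihroot
      have hgetDins : ((ufFind f uf (uf.parent.getD x x)).1.parent.insert x (ufFind f uf (uf.parent.getD x x)).2).getD x x
          = (ufFind f uf (uf.parent.getD x x)).2 := PySem.Dict.getD_insert_self _ _ _ _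
      simp only [ufFind, if_pos hx]
      rw [hgetDins]
      refine ⟨⟨?_, ?_, ihInv.2.2.1, ?_⟩, ?_, ?_, ?_, ?_⟩
      · intro z q hz
        rw [PySem.Dict.get?_insert] at hz
        by_cases hzx : z = x
        · rw [if_pos hzx] at hz
          have hq : q = (ufFind f uf (uf.parent.getD x x)).2 := (Option.some.injEq _ _).mp hz.symm
          subst hq; subst hzx
          exact ⟨by have := hE1x.1; omega, ihlab.trans hE1x.2⟩
        · rw [if_neg hzx] at hz
          exact ihInv.1 z q hz
      · intro z w hz hw hlw
        rw [PySem.Dict.get?_insert] at hz hw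
        by_cases hzx : z = x
        · rw [if_pos hzx] at hz; simp at hz
        · by_cases hwx : w = x
          · rw [if_pos hwx] at hw; simp at hw
          · rw [if_neg hzx] at hz; rw [if_neg hwx] at hw
            exact ihInv.2.1 z w hz hw hlw
      · rw [hkeys2]; exact ihInv.2.2.2
      · exact hkeys2.trans ihkeys
      · exact ihlab.trans hE1x.2
      · rw [PySem.Dict.get?_insert, if_neg hrx]
        exact ihroot
      · have := hE1x.1
        omega

theorem ufFindP_spec (c : PySem.Dict String String) (rk : String → Nat) (uf : UF) (x : String)
    (h : InvP uf c rk) :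
    InvP (ufFindP uf x).1 c rk ∧
    (ufFindP uf x).1.parent.keys = uf.parent.keys ∧
    labD c (ufFindP uf x).2 = labD c x ∧
    (ufFindP uf x).1.parent.get? (ufFindP uf x).2 = none ∧
    rk (ufFindP uf x).2 ≤ rk x := by
  apply ufFind_spec c rk _ uf x h
  have h1 : (uf.parent.keys.filter (fun k => rk k ≤ rk x)).length ≤ uf.parent.keys.length :=
    List.length_filter_le _ _
  have h2 : uf.parent.keys.length = uf.parent.size := by
    simp [PySem.Dict.keys, PySem.Dict.size]
  omega

theorem link_spec (parent : PySem.Dict String String) (rank' : PySem.Dict String Int)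
    (rank : PySem.Dict String Int)
    (c c' : PySem.Dict String String) (rk : String → Nat) (ra rb t : String)
    (hInv : InvP ⟨parent, rank⟩ c rk)
    (hra : parent.get? ra = none) (hrb : parent.get? rb = none)
    (hne : labD c ra ≠ labD c rb)
    (ht : t = labD c ra ∨ t = labD c rb)
    (hc' : ∀ x, labD c' x = if labD c x = labD c rb ∨ labD c x = labD c ra then t else labD c x)
    (hE3 : ∀ k v, c'.get? k = some v → c'.contains v = true) :
    UCInv ⟨parent.insert rb ra, rank'⟩ c' := by
  obtain ⟨hE1, hE2, _, hND⟩ := hInv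
  have hlabt : labD c' ra = t ∧ labD c' rb = t := by
    constructor
    · rw [hc' ra, if_pos (Or.inr rfl)]
    · rw [hc' rb, if_pos (Or.inl rfl)]
  refine ⟨fun x => if labD c x = labD c rb then rk x + rk ra + 1 else rk x, ?_, ?_, hE3, ?_⟩
  · intro z q hz
    rw [PySem.Dict.get?_insert] at hz
    by_cases hzb : z = rb
    · rw [if_pos hzb] at hz
      have hq : q = ra := by
        have := (Option.some.injEq _ _).mp hz.symm
        exact this
      subst hq; subst hzb
      constructor
      · simp only [if_neg hne, if_true]
        omega
      · rw [hlabt.1, hlabt.2]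
    · rw [if_neg hzb] at hz
      have h1 := hE1 z q hz
      constructor
      · simp only []
        rw [h1.2]
        split_ifs with hcond
        · omega
        · exact h1.1
      · rw [hc' q, hc' z, h1.2]
  · intro z w hz hw hlw
    rw [PySem.Dict.get?_insert] at hz hw
    by_cases hzb : z = rb
    · rw [if_pos hzb] at hz; simp at hz
    by_cases hwb : w = rb
    · rw [if_pos hwb] at hw; simp at hw
    rw [if_neg hzb] at hz
    rw [if_neg hwb] at hw
    rw [hc' z, hc' w] at hlw
    by_cases hz1 : labD c z = labD c rb ∨ labD c z = labD c ra
    · have hzra : z = ra := by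
        rcases hz1 with h | h
        · exact absurd (hE2 z rb hz hrb h) hzb
        · exact hE2 z ra hz hra h
      by_cases hw1 : labD c w = labD c rb ∨ labD c w = labD c ra
      · have hwra : w = ra := by
          rcases hw1 with h | h
          · exact absurd (hE2 w rb hw hrb h) hwb
          · exact hE2 w ra hw hra h
        rw [hzra, hwra]
      · rw [if_pos hz1, if_neg hw1] at hlw
        exfalso
        rcases ht with h | h
        · exact hw1 (Or.inr (hlw ▸ h ▸ rfl))
        · exact hw1 (Or.inl (hlw ▸ h ▸ rfl))
    · by_cases hw1 : labD c w = labD c rb ∨ labD c w = labD c ra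
      · rw [if_neg hz1, if_pos hw1] at hlw
        exfalso
        rcases ht with h | h
        · exact hz1 (Or.inr (hlw.symm ▸ h ▸ rfl))
        · exact hz1 (Or.inl (hlw.symm ▸ h ▸ rfl))
      · rw [if_neg hz1, if_neg hw1] at hlw
        exact hE2 z w hz hw hlw
  · exact PySem.Dict.nodup_keys_insert _ _ _ hND

-- labD is untouched by `setdefault k k`
theorem labD_setdefault (c : PySem.Dict String String) (k x : String) :
    labD (c.setdefault k k) x = labD c x := by
  unfold labD
  by_cases hx : x = k
  · subst hx
    rw [PySem.Dict.getD_eq_get?_getD, PySem.Dict.get?_setdefault_self,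
      PySem.Dict.getD_eq_get?_getD]
    rfl
  · rw [PySem.Dict.getD_eq_get?_getD, PySem.Dict.get?_setdefault_of_ne _ _ hx,
      ← PySem.Dict.getD_eq_get?_getD]

-- values-are-keys survives `setdefault k k`
theorem E3_setdefault (c : PySem.Dict String String) (k : String)
    (h : ∀ k' v, c.get? k' = some v → c.contains v = true) :
    ∀ k' v, (c.setdefault k k).get? k' = some v → (c.setdefault k k).contains v = true := by
  cases hc : c.contains k
  · rw [PySem.Dict.setdefault_of_not_contains _ _ hc]
    intro k' v hv
    rw [PySem.Dict.get?_insert] at hv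
    rw [PySem.Dict.contains_insert]
    by_cases hk' : k' = k
    · rw [if_pos hk'] at hv
      have : v = k := (Option.some.injEq _ _).mp hv.symm
      subst this
      simp
    · rw [if_neg hk'] at hv
      simp [h k' v hv]
  · rw [PySem.Dict.setdefault_of_contains _ _ hc]
    exact h

-- get? through a value-map of the underlying items
theorem get?_mapVals (g : String → String) :
    ∀ (items : List (String × String)) (x : String),
      (PySem.Dict.mk (items.map (fun kv => (kv.1, g kv.2)))).get? x
        = ((PySem.Dict.mk items).get? x).map g := by
  intro items
  induction items with
  | nil => intro x; rfl
  | cons kv rest ih =>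
    intro x
    rw [List.map_cons]
    rw [PySem.Dict.get?_mk_cons, PySem.Dict.get?_mk_cons]
    by_cases hk : (kv.1 == x) = true
    · rw [if_pos hk, if_pos hk]; rfl
    · rw [if_neg hk, if_neg hk]; exact ih x

-- InvP only reads c through labD and the values-are-keys condition
theorem InvP_lab_congr (uf : UF) (c c' : PySem.Dict String String) (rk : String → Nat)
    (hl : ∀ x, labD c x = labD c' x)
    (hE3 : ∀ k v, c'.get? k = some v → c'.contains v = true)
    (h : InvP uf c rk) : InvP uf c' rk := by
  obtain ⟨hE1, hE2, _, hND⟩ := h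
  refine ⟨?_, ?_, hE3, hND⟩
  · intro x p hx
    have h1 := hE1 x p hx
    exact ⟨h1.1, by rw [← hl, ← hl]; exact h1.2⟩
  · intro z w hz hw hlw
    exact hE2 z w hz hw (by rw [hl, hl]; exact hlw)

theorem ufUnion_spec (uf : UF) (c : PySem.Dict String String) (l r : String) (h : UCInv uf c) :
    UCInv (ufUnion uf l r) (bStep c l r) := by
  obtain ⟨rk, hI⟩ := h
  obtain ⟨I1, K1, L1, R1, _⟩ := ufFindP_spec c rk uf l hI
  obtain ⟨I2, K2, L2, R2, _⟩ := ufFindP_spec c rk (ufFindP uf l).1 r I1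
  have hRx2 : (ufFindP (ufFindP uf l).1 r).1.parent.get? (ufFindP uf l).2 = none := by
    rw [PySem.Dict.get?_eq_none_iff_not_mem_keys, K2, ← PySem.Dict.get?_eq_none_iff_not_mem_keys]
    exact R1
  have hlab1 : ∀ x, labD ((c.setdefault l l).setdefault r r) x = labD c x := by
    intro x; rw [labD_setdefault, labD_setdefault]
  have hE3c2 : ∀ k v, ((c.setdefault l l).setdefault r r).get? k = some v →
      ((c.setdefault l l).setdefault r r).contains v = true :=
    E3_setdefault _ r (E3_setdefault _ l hI.2.2.1)
  have I2' : InvP (ufFindP (ufFindP uf l).1 r).1 ((c.setdefault l l).setdefault r r) rk :=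
    InvP_lab_congr _ _ _ _ (fun x => (hlab1 x).symm) hE3c2 I2
  have ha' : (c.setdefault l l).getD l l = labD c l := labD_setdefault c l l
  have hb' : ((c.setdefault l l).setdefault r r).getD r r = labD c r :=
    (labD_setdefault (c.setdefault l l) r r).trans (labD_setdefault c l r)
  have hgr : ((c.setdefault l l).setdefault r r).get? r = some (labD c r) := by
    rw [PySem.Dict.get?_setdefault_self]
    exact congrArg some ((PySem.Dict.getD_eq_get?_getD _ r r).symm.trans (labD_setdefault c l r))
  have hgl : ((c.setdefault l l).setdefault r r).get? l = some (labD c l) := by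
    by_cases hlr : l = r
    · subst hlr; exact hgr
    · rw [PySem.Dict.get?_setdefault_of_ne _ _ hlr, PySem.Dict.get?_setdefault_self]
      exact congrArg some ((PySem.Dict.getD_eq_get?_getD _ l l).symm)
  have hca : ((c.setdefault l l).setdefault r r).contains (labD c l) = true := hE3c2 l _ hgl
  have hcb : ((c.setdefault l l).setdefault r r).contains (labD c r) = true := hE3c2 r _ hgr
  have heqrx : labD ((c.setdefault l l).setdefault r r) (ufFindP uf l).2 = labD c l :=
    (hlab1 _).trans L1
  have heqry : labD ((c.setdefault l l).setdefault r r) (ufFindP (ufFindP uf l).1 r).2 = labD c r :=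
    (hlab1 _).trans L2
  simp only [ufUnion, bStep]
  rw [ha', hb']
  by_cases hxy : (ufFindP uf l).2 = (ufFindP (ufFindP uf l).1 r).2
  · have hab : labD c l = labD c r := by rw [← L1, ← L2, hxy]
    rw [if_neg (not_not_intro hxy), if_neg (not_not_intro hab)]
    exact ⟨rk, I2'⟩
  · have hab : labD c l ≠ labD c r := by
      intro he
      exact hxy (I2.2.1 _ _ hRx2 R2 (by rw [L1, L2, he]))
    rw [if_pos hxy, if_pos hab]
    have hmaster : ∀ x,
        labD (PySem.Dict.mk (((c.setdefault l l).setdefault r r).items.map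
          (fun kv => (kv.1, if kv.2 = labD c r then labD c l else kv.2)))) x
        = if labD ((c.setdefault l l).setdefault r r) x = labD c r ∨
             labD ((c.setdefault l l).setdefault r r) x = labD c l
          then labD c l else labD ((c.setdefault l l).setdefault r r) x := by
      intro x
      have hg := get?_mapVals (fun v => if v = labD c r then labD c l else v)
        ((c.setdefault l l).setdefault r r).items x
      show (PySem.Dict.mk _).getD x x = _
      rw [PySem.Dict.getD_eq_get?_getD]
      rw [show (PySem.Dict.mk (((c.setdefault l l).setdefault r r).items.map
          (fun kv => (kv.1, if kv.2 = labD c r then labD c l else kv.2)))) =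
          (PySem.Dict.mk (((c.setdefault l l).setdefault r r).items.map
          (fun kv => (kv.1, (fun v => if v = labD c r then labD c l else v) kv.2)))) from rfl]
      rw [hg]
      cases hgx : ((c.setdefault l l).setdefault r r).get? x with
      | some v =>
        have hvx : labD ((c.setdefault l l).setdefault r r) x = v :=
          PySem.Dict.getD_of_get?_eq_some _ _ hgx
        rw [hvx]
        simp only [Option.map_some, Option.getD_some]
        by_cases h1 : v = labD c r
        · simp [h1]
        · by_cases h2 : v = labD c l
          · simp [h2]
          · simp [h1, h2]
      | none =>
        have hx0 : labD ((c.setdefault l l).setdefault r r) x = x :=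
          PySem.Dict.getD_of_get?_eq_none _ _ hgx
        rw [hx0]
        simp only [Option.map_none, Option.getD_none]
        have hxa : x ≠ labD c l := by
          intro he
          rw [he, PySem.Dict.get?_eq_none_iff_not_mem_keys] at hgx
          exact hgx ((PySem.Dict.contains_iff_mem_keys _ _).mp hca)
        have hxb : x ≠ labD c r := by
          intro he
          rw [he, PySem.Dict.get?_eq_none_iff_not_mem_keys] at hgx
          exact hgx ((PySem.Dict.contains_iff_mem_keys _ _).mp hcb)
        rw [if_neg (by rw [not_or]; exact ⟨hxb, hxa⟩)]
    have hE3' : ∀ k v,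
        (PySem.Dict.mk (((c.setdefault l l).setdefault r r).items.map
          (fun kv => (kv.1, if kv.2 = labD c r then labD c l else kv.2)))).get? k = some v →
        (PySem.Dict.mk (((c.setdefault l l).setdefault r r).items.map
          (fun kv => (kv.1, if kv.2 = labD c r then labD c l else kv.2)))).contains v = true := by
      have hc : ∀ z,
          (PySem.Dict.mk (((c.setdefault l l).setdefault r r).items.map
            (fun kv => (kv.1, if kv.2 = labD c r then labD c l else kv.2)))).contains z
          = ((c.setdefault l l).setdefault r r).contains z := by
        intro z
        rw [PySem.Dict.contains_eq_isSome_get?, PySem.Dict.contains_eq_isSome_get?,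
          get?_mapVals (fun v => if v = labD c r then labD c l else v)]
        cases ((c.setdefault l l).setdefault r r).get? z <;> rfl
      intro k v hk
      rw [hc]
      rw [get?_mapVals (fun v => if v = labD c r then labD c l else v)] at hk
      cases hgk : ((c.setdefault l l).setdefault r r).get? k with
      | none => rw [hgk] at hk; simp at hk
      | some w =>
        rw [hgk] at hk
        simp only [Option.map_some, Option.some.injEq] at hk
        by_cases hw : w = labD c r
        · rw [hw] at hk; rw [if_pos rfl] at hk; rw [← hk]; exact hca
        · rw [if_neg hw] at hk; rw [← hk]; exact hE3c2 k w hgk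
    split_ifs with hr1 hr2
    · exact link_spec _ _ _ _ _ rk (ufFindP uf l).2 (ufFindP (ufFindP uf l).1 r).2 (labD c l)
        I2' hRx2 R2 (by rw [heqrx, heqry]; exact hab) (Or.inl heqrx.symm)
        (fun x => by rw [heqrx, heqry]; exact hmaster x) hE3'
    · exact link_spec _ _ _ _ _ rk (ufFindP (ufFindP uf l).1 r).2 (ufFindP uf l).2 (labD c l)
        I2' R2 hRx2 (by rw [heqrx, heqry]; exact fun he => hab he.symm) (Or.inr heqrx.symm)
        (fun x => by rw [heqrx, heqry, hmaster x]; exact if_congr or_comm rfl rfl) hE3'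
    · exact link_spec _ _ _ _ _ rk (ufFindP uf l).2 (ufFindP (ufFindP uf l).1 r).2 (labD c l)
        I2' hRx2 R2 (by rw [heqrx, heqry]; exact hab) (Or.inl heqrx.symm)
        (fun x => by rw [heqrx, heqry]; exact hmaster x) hE3'

theorem sweep_spec : ∀ (rem : List (Int × String × String)) (uf : UF) (c : PySem.Dict String String) (date : Int),
    UCInv uf c →
    (aSweep uf rem date).2 = (bSweep c rem date).2 ∧ UCInv (aSweep uf rem date).1 (bSweep c rem date).1 := by
  intro rem
  induction rem with
  | nil => intro uf c date h; exact ⟨rfl, h⟩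
  | cons hd tl ih =>
    intro uf c date h
    obtain ⟨d, l, r⟩ := hd
    simp only [aSweep, bSweep]
    by_cases hdd : d ≤ date
    · rw [if_pos hdd, if_pos hdd]
      exact ih (ufUnion uf l r) (bStep c l r) date (ufUnion_spec _ _ _ _ h)
    · rw [if_neg hdd, if_neg hdd]
      exact ⟨rfl, h⟩

theorem loop_spec : ∀ (planes : List (String × Int × String × String)) (rem : List (Int × String × String)) (uf : UF) (c : PySem.Dict String String),
    UCInv uf c → aLoop uf rem planes = bLoop c rem planes := by
  intro planes
  induction planes with
  | nil => intro rem uf c _; rfl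
  | cons p ps ih =>
    obtain ⟨code, date, dep, arr⟩ := p
    intro rem uf c h
    obtain ⟨hrem, hinv⟩ := sweep_spec rem uf c date h
    obtain ⟨rk, hIP⟩ := hinv
    obtain ⟨J1, K1, L1, R1, _⟩ := ufFindP_spec _ rk (aSweep uf rem date).1 dep hIP
    obtain ⟨J2, K2, L2, R2, _⟩ :=
      ufFindP_spec _ rk (ufFindP (aSweep uf rem date).1 dep).1 arr J1
    have hRd : (ufFindP (ufFindP (aSweep uf rem date).1 dep).1 arr).1.parent.get?
        (ufFindP (aSweep uf rem date).1 dep).2 = none := by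
      rw [PySem.Dict.get?_eq_none_iff_not_mem_keys, K2,
        ← PySem.Dict.get?_eq_none_iff_not_mem_keys]
      exact R1
    have hcond : ((ufFindP (aSweep uf rem date).1 dep).2
          = (ufFindP (ufFindP (aSweep uf rem date).1 dep).1 arr).2)
        ↔ (labD (bSweep c rem date).1 dep = labD (bSweep c rem date).1 arr) := by
      constructor
      · intro he
        calc labD (bSweep c rem date).1 dep
            = labD (bSweep c rem date).1 (ufFindP (aSweep uf rem date).1 dep).2 := L1.symm
          _ = labD (bSweep c rem date).1 (ufFindP (ufFindP (aSweep uf rem date).1 dep).1 arr).2 := by rw [he]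
          _ = labD (bSweep c rem date).1 arr := L2
      · intro he
        exact J2.2.1 _ _ hRd R2 (L1.trans (he.trans L2.symm))
    have hrec : aLoop (ufFindP (ufFindP (aSweep uf rem date).1 dep).1 arr).1
          (aSweep uf rem date).2 ps
        = bLoop (bSweep c rem date).1 (bSweep c rem date).2 ps := by
      rw [hrem]
      exact ih _ _ _ ⟨rk, J2⟩
    simp only [aLoop, bLoop]
    by_cases hcc : (ufFindP (aSweep uf rem date).1 dep).2
        = (ufFindP (ufFindP (aSweep uf rem date).1 dep).1 arr).2
    · rw [if_pos hcc, if_pos (show (bSweep c rem date).1.getD dep dep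
        = (bSweep c rem date).1.getD arr arr from hcond.mp hcc), hrec]
    · rw [if_neg hcc, if_neg (show ¬ (bSweep c rem date).1.getD dep dep
        = (bSweep c rem date).1.getD arr arr from fun hbc => hcc (hcond.mpr hbc)), hrec]

-- ===== VERDICT (by name: the statement is the Claim_ definition above) =====
theorem trains_planes_spec : Claim_equal_trains_planes := by
  intro trains planes _
  unfold Spec_trains_planes trains_planes trains_planes_alt
  apply loop_spec
  exact ⟨fun _ => 0, by simp [InvP, labD, PySem.Dict.get?_empty]⟩
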